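-- pv_equiv track=rewrite | github.com/onealmond/hacking-lab | dawgctf-2021/binary-bbomb/phase4.py | find_fibonacci_index
-- ===== SOURCE A (Python) =====
-- def find_fibonacci_index(values):
--     ma = max(values)
--     w = [0] * 100
--     w[0] = 1
--     w[1] = 1
--     i = 2
--     n = 0
--     seq = [-1] * len(values)
--     while n < ma:
--         n = w[(i-1)%100] + w[(i-2)%100]
--         w[i % 100] = n
--         try:
--             loc = -1
--             while True:
--                 loc = values.index(n, loc+1, len(values))
--                 seq[loc] = i+1
--         except ValueError:
--             pass
--         finally:
--             i += 1
--     return seq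
-- ===== SOURCE B (Python) =====
-- def find_fibonacci_index(values):
--     ma = max(values)
--     table = {}
--     a, b = 1, 1
--     i = 2
--     n = 0
--     while n < ma:
--         n = a + b
--         table[n] = i + 1
--         a, b = b, n
--         i += 1
--     return [table.get(v, -1) for v in values]
-- ===== Notes on version B (the rewrite author's own statement) =====
-- stated objective: simpler
-- what changed: A drives a loop over fibonacci numbers and, for each one, runs an inner try/except values.index scan to stamp every occurrence into a preallocated seq array; B builds the fibonacci-value-to-index dict once and then maps each value through a single table.get(v,-1) pass, removing the inner scanning loop entirely.
import Mathlib
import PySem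

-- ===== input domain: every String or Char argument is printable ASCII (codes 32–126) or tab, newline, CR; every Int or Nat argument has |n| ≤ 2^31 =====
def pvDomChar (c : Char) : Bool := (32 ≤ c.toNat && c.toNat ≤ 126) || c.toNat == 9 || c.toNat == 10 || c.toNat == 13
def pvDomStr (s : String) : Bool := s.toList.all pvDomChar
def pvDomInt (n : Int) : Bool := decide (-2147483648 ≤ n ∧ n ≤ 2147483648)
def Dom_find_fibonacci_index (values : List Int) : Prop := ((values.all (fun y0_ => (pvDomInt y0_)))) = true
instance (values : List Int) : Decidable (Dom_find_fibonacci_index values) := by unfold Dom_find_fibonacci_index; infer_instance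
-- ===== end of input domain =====

-- B replaces A's per-fibonacci inner index-scanning loop by one dict build plus a single map over values (simpler).

-- ===== PORT A =====
-- values.index(v, start, len(values)) with 0 ≤ start has no PySem list primitive; ported by hand:
-- first index ≥ start holding v, none exactly where Python raises ValueError (exact for 0 ≤ start ≤ len).
def pvIndexFrom? (xs : List Int) (v : Int) (start : Nat) : Option Nat :=
  (PySem.List.index? (xs.drop start) v).map (· + start)

-- the try/while True inner loop: loc = values.index(n, loc+1, len(values)); seq[loc] = i+1; until ValueError.
-- Python's loc starts at -1 and only loc+1 (≥ 0) is ever used as an index, so the Nat parameter start = loc+1 is exact.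
def pvMarkLoop (values : List Int) (v : Int) (idx : Int) (seq : List Int) (start : Nat) : List Int :=
  match h : pvIndexFrom? values v start with
  | none => seq
  | some loc => pvMarkLoop values v idx (seq.set loc idx) (loc + 1)
termination_by values.length - start
decreasing_by
  simp only [pvIndexFrom?, Option.map_eq_some_iff] at h
  obtain ⟨k, hk, rfl⟩ := h
  obtain ⟨hlt, -⟩ := PySem.List.getElem_of_index?_eq_some hk
  simp only [List.length_drop] at hlt
  omega

-- the outer `while n < ma` loop; the fuel ma.toNat + 1 is a totality guard only (n grows by at least 1 per pass)
def find_fibonacci_index_loop (values : List Int) (ma : Int) (w : List Int) (i : Nat)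
    (n : Int) (seq : List Int) (fuel : Nat) : List Int :=
  match fuel with
  | 0 => seq
  | fuel + 1 =>
    if n < ma then
      let n' := w.getD ((i - 1) % 100) 0 + w.getD ((i - 2) % 100) 0
      let w' := w.set (i % 100) n'
      let seq' := pvMarkLoop values n' ((i : Int) + 1) seq 0
      find_fibonacci_index_loop values ma w' (i + 1) n' seq' fuel
    else seq

def find_fibonacci_index (values : List Int) : List Int :=
  match PySem.List.max? values (fun x => x) with
  | none => []   -- Python's max raises ValueError on the empty list; excluded by Pre_
  | some ma =>
    let w := ((List.replicate 100 (0 : Int)).set 0 1).set 1 1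
    find_fibonacci_index_loop values ma w 2 0 (List.replicate values.length (-1)) (ma.toNat + 1)

-- ===== PORT B =====
-- while n < ma: n = a + b; table[n] = i + 1; a, b = b, n; i += 1   (same totality fuel)
def fib_table_loop (ma : Int) (a b : Int) (i : Nat) (n : Int)
    (table : PySem.Dict Int Int) (fuel : Nat) : PySem.Dict Int Int :=
  match fuel with
  | 0 => table
  | fuel + 1 =>
    if n < ma then
      let n' := a + b
      fib_table_loop ma b n' (i + 1) n' (table.insert n' ((i : Int) + 1)) fuel
    else table

def find_fibonacci_index_alt (values : List Int) : List Int :=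
  match PySem.List.max? values (fun x => x) with
  | none => []   -- Python's max raises ValueError on the empty list; excluded by Pre_
  | some ma =>
    let table := fib_table_loop ma 1 1 2 0 PySem.Dict.empty (ma.toNat + 1)
    values.map (fun v => table.getD v (-1))

-- ===== PRECONDITION & SPEC =====
-- Pre_ excludes only the empty list, on which Python's max(values) raises ValueError in both A and B.
def Pre_find_fibonacci_index (values : List Int) : Prop := values ≠ []
instance (values : List Int) : Decidable (Pre_find_fibonacci_index values) := by
  unfold Pre_find_fibonacci_index; infer_instance
def pvWitness_find_fibonacci_index : List Int := [1, 2, 3, 13, 7]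

def Spec_find_fibonacci_index (values : List Int) (out : List Int) : Prop := out = find_fibonacci_index_alt values
instance (values : List Int) (out : List Int) : Decidable (Spec_find_fibonacci_index values out) := by unfold Spec_find_fibonacci_index; infer_instance

-- ===== CLAIM (what is proved, stated in full; the proofs are below) =====
def Claim_equal_find_fibonacci_index : Prop := ∀ (values : List Int), Dom_find_fibonacci_index values → Pre_find_fibonacci_index values → Spec_find_fibonacci_index values (find_fibonacci_index values)

-- ===== LEMMAS AND PROOFS =====

theorem pvIndexFrom?_some {xs : List Int} {v : Int} {start loc : Nat}
    (h : pvIndexFrom? xs v start = some loc) :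
    start ≤ loc ∧ loc < xs.length ∧ xs[loc]? = some v ∧
      ∀ j, start ≤ j → j < loc → xs[j]? ≠ some v := by
  simp only [pvIndexFrom?, Option.map_eq_some_iff] at h
  obtain ⟨k, hk, rfl⟩ := h
  obtain ⟨hlt, hv, hmin⟩ := PySem.List.getElem_of_index?_eq_some hk
  simp only [List.length_drop] at hlt
  have hkl : k + start < xs.length := by omega
  refine ⟨by omega, hkl, ?_, ?_⟩
  · have : (xs.drop start)[k]? = some v := by
      rw [List.getElem?_eq_getElem (by simp only [List.length_drop]; omega : k < (xs.drop start).length)]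
      exact congrArg some hv
    rw [List.getElem?_drop] at this
    rwa [show start + k = k + start from by omega] at this
  · intro j hj1 hj2 hv'
    have h1 : (xs.drop start)[j - start]? = some v := by
      rw [List.getElem?_drop, show start + (j - start) = j from by omega]; exact hv'
    have h2 := hmin (j - start) (by omega)
    rw [List.getElem?_eq_getElem (by simp only [List.length_drop]; omega)] at h1
    exact h2 (by injection h1)

theorem pvIndexFrom?_none {xs : List Int} {v : Int} {start : Nat}
    (h : pvIndexFrom? xs v start = none) :
    ∀ j, start ≤ j → j < xs.length → xs[j]? ≠ some v := by
  simp only [pvIndexFrom?, Option.map_eq_none_iff, PySem.List.index?_eq_none_iff] at h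
  intro j hj1 hj2 hv
  apply h
  rw [List.mem_iff_getElem?]
  exact ⟨j - start, by rw [List.getElem?_drop, show start + (j - start) = j from by omega]; exact hv⟩

theorem getElem?_set_spec (seq : List Int) (loc j : Nat) (idx : Int) :
    (seq.set loc idx)[j]? = if j = loc ∧ j < seq.length then some idx else seq[j]? := by
  rw [List.getElem?_set]; split_ifs with h1 h2 h3 <;> simp_all; omega

theorem pvMarkLoop_getElem? (values : List Int) (v idx : Int) (seq : List Int) (start : Nat)
    (j : Nat) (hlen : seq.length = values.length) :
    (pvMarkLoop values v idx seq start)[j]? =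
      if start ≤ j ∧ values[j]? = some v then some idx else seq[j]? := by
  fun_induction pvMarkLoop values v idx seq start with
  | case1 seq start h =>
    rw [if_neg]
    rintro ⟨hj1, hj2⟩
    obtain ⟨hjl, -⟩ := List.getElem?_eq_some_iff.mp hj2
    exact pvIndexFrom?_none h j hj1 hjl hj2
  | case2 seq start loc h ih =>
    obtain ⟨hs, hloc, hv, hmin⟩ := pvIndexFrom?_some h
    rw [ih (by simpa using hlen)]
    have hset := getElem?_set_spec seq loc j idx
    by_cases hj : values[j]? = some v
    · by_cases h1 : loc + 1 ≤ j
      · rw [if_pos ⟨h1, hj⟩, if_pos ⟨by omega, hj⟩]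
      · rw [if_neg (by intro hc; exact h1 hc.1)]
        by_cases h2 : j = loc
        · subst h2
          rw [hset, if_pos ⟨rfl, by omega⟩, if_pos ⟨hs, hj⟩]
        · have h3 : ¬ start ≤ j := by
            intro hc
            exact hmin j hc (by omega) hj
          rw [hset, if_neg (by intro hc; exact h2 hc.1), if_neg (by intro hc; exact h3 hc.1)]
    · have hne : j ≠ loc := by intro hc; subst hc; exact hj hv
      rw [if_neg (by intro hc; exact hj hc.2), if_neg (by intro hc; exact hj hc.2),
        hset, if_neg (by intro hc; exact hne hc.1)]

theorem pvMarkLoop_map (values : List Int) (v idx : Int) (f : Int → Int) :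
    pvMarkLoop values v idx (values.map f) 0 =
      values.map (fun x => if x = v then idx else f x) := by
  apply List.ext_getElem?_iff.mpr
  intro j
  rw [pvMarkLoop_getElem? values v idx _ 0 j (by simp)]
  by_cases hj : j < values.length
  · rw [List.getElem?_eq_getElem hj, List.getElem?_eq_getElem (by simpa using hj),
      List.getElem?_eq_getElem (by simpa using hj)]
    simp only [List.getElem_map]
    by_cases hv : values[j] = v
    · rw [if_pos ⟨Nat.zero_le j, congrArg some hv⟩, if_pos hv]
    · rw [if_neg (by rintro ⟨-, hc⟩; exact hv (by injection hc)), if_neg hv]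
  · rw [List.getElem?_eq_none (by omega), List.getElem?_eq_none (by simp; omega),
      List.getElem?_eq_none (by simp; omega)]
    rw [if_neg (by rintro ⟨-, hc⟩; simp at hc)]

theorem loop_eq (values : List Int) (ma : Int) :
    ∀ (fuel : Nat) (w : List Int) (a b n : Int) (i : Nat) (table : PySem.Dict Int Int),
      2 ≤ i → w.length = 100 →
      w.getD ((i - 1) % 100) 0 = b → w.getD ((i - 2) % 100) 0 = a →
      find_fibonacci_index_loop values ma w i n (values.map fun v => table.getD v (-1)) fuel
        = values.map (fun v => (fib_table_loop ma a b i n table fuel).getD v (-1)) := by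
  intro fuel
  induction fuel with
  | zero => intro w a b n i table _ _ _ _; rfl
  | succ fuel ih =>
    intro w a b n i table hi hw hb ha
    simp only [find_fibonacci_index_loop, fib_table_loop]
    by_cases hlt : n < ma
    · rw [if_pos hlt, if_pos hlt]
      simp only [hb, ha]
      have hcomm : b + a = a + b := by ring
      rw [hcomm]
      have hmark : pvMarkLoop values (a + b) ((i : Int) + 1) (values.map fun v => table.getD v (-1)) 0
          = values.map fun v => (table.insert (a + b) ((i : Int) + 1)).getD v (-1) := by
        rw [pvMarkLoop_map]
        apply List.map_congr_left
        intro x _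
        rw [PySem.Dict.getD_insert]
      rw [hmark]
      apply ih
      · omega
      · simp [hw]
      · have : (i + 1 - 1) % 100 = i % 100 := by omega
        rw [this, List.getD_eq_getElem _ _ (by rw [List.length_set, hw]; exact Nat.mod_lt _ (by norm_num)),
          List.getElem_set_self]
      · have h1 : (i + 1 - 2) % 100 = (i - 1) % 100 := by omega
        have h2 : i % 100 ≠ (i - 1) % 100 := by omega
        rw [h1, ← hb]
        rw [List.getD_eq_getElem _ _ (by rw [List.length_set, hw]; exact Nat.mod_lt _ (by norm_num)),
          List.getD_eq_getElem _ _ (by rw [hw]; exact Nat.mod_lt _ (by norm_num)),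
          List.getElem_set_ne h2]
    · rw [if_neg hlt, if_neg hlt]

-- ===== VERDICT (by name: the statement is the Claim_ definition above) =====
theorem find_fibonacci_index_spec : Claim_equal_find_fibonacci_index := by
  intro values _ hpre
  unfold Spec_find_fibonacci_index find_fibonacci_index find_fibonacci_index_alt
  cases hmax : PySem.List.max? values (fun x => x) with
  | none => exact absurd ((PySem.List.max?_eq_none_iff values (fun x => x)).mp hmax) hpre
  | some ma =>
    have hinit : List.replicate values.length (-1 : Int)
        = values.map fun v => (PySem.Dict.empty : PySem.Dict Int Int).getD v (-1) := by
      simp [PySem.Dict.getD_empty, List.map_const']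
    rw [hinit]
    exact loop_eq values ma (ma.toNat + 1) _ 1 1 0 2 PySem.Dict.empty (by norm_num)
      (by decide) (by decide) (by decide)
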